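-- pv_equiv track=rewrite | github.com/voletiv/sanskrit-speech-recognition | devanagari_functions.py | shlok_lengths
-- ===== SOURCE A (Python) =====
-- def shlok_lengths(shlokasSyllables):
--     """Return a dictionary of lengths of syllables of shlokas in shlokasSyllables.
--     Input
--     shlokasSyllables : list of lists of syllables in every shloka
--     Ouptuts
--     shlokLengths : dictionary of shlok_lengths:shlok_numbers
--     """
--     shlokLengths = {}
--     for i, shlokSyllables in enumerate(shlokasSyllables):
--             lenSyllables = len(shlokSyllables)
--             if lenSyllables not in shlokLengths.keys():
--                 shlokLengths[lenSyllables] = [i]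
--             else:
--                 shlokLengths[lenSyllables].append(i)
--     return shlokLengths
-- ===== SOURCE B (Python) =====
-- def shlok_lengths(shlokasSyllables):
--     """Return a dictionary of lengths of syllables of shlokas in shlokasSyllables.
--     Same result as A, built by grouping: distinct lengths in first-appearance
--     order, each mapped to the ascending list of indices having that length."""
--     lengths = [len(s) for s in shlokasSyllables]
--     return {L: [i for i, l in enumerate(lengths) if l == L]
--             for L in dict.fromkeys(lengths)}
-- ===== Notes on version B (the rewrite author's own statement) =====
-- stated objective: simpler
-- what changed: Replaces the incremental dict-building loop (membership test, create-or-append per element) with a two-line grouping: compute all lengths once, then a dict comprehension over the distinct lengths (dict.fromkeys order = first appearance), each key getting its indices by a comprehension.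
import Mathlib
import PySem

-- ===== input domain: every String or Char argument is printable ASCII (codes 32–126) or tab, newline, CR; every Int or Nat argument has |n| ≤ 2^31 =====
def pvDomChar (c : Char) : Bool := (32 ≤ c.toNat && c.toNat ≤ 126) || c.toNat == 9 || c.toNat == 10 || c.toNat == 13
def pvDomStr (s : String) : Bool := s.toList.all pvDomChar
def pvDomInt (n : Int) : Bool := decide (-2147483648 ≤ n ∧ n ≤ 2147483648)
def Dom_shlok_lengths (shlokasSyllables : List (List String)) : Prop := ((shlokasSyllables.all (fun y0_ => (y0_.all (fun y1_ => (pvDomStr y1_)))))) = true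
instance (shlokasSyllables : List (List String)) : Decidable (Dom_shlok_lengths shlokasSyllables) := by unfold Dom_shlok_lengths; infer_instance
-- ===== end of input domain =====

-- B replaces A's incremental per-element dict loop by a two-line grouping
-- (distinct lengths in first-appearance order, each mapped to its index list);
-- same return value, objective: simpler.

-- ===== PORT A =====
-- literal transliteration of A: a dict built in a loop over enumerate, with
-- 'not in keys' → insert [i], else → append i
def shlok_lengths (shlokasSyllables : List (List String)) : List (Int × List Int) :=
  ((PySem.List.enumerate shlokasSyllables).foldl
    (fun (d : PySem.Dict Int (List Int)) (p : Int × List String) =>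
      let lenSyllables : Int := (p.2.length : Int)
      if d.contains lenSyllables = false then
        d.insert lenSyllables [p.1]
      else
        d.modify lenSyllables [] (fun v => v ++ [p.1]))
    PySem.Dict.empty).items

-- ===== PORT B =====
-- literal transliteration of B: lengths computed once; dict comprehension over
-- dict.fromkeys(lengths) (= PySem.List.dedup) with an index comprehension per key
def shlok_lengths_alt (shlokasSyllables : List (List String)) : List (Int × List Int) :=
  let lengths : List Int := shlokasSyllables.map (fun s => (s.length : Int))
  (PySem.List.dedup lengths).map
    (fun L => (L, (PySem.List.enumerate lengths).filterMap
      (fun p => if p.2 = L then some p.1 else none)))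

-- ===== PRECONDITION & SPEC =====
def Spec_shlok_lengths (shlokasSyllables : List (List String)) (out : List (Int × List Int)) : Prop := out = shlok_lengths_alt shlokasSyllables
instance (shlokasSyllables : List (List String)) (out : List (Int × List Int)) : Decidable (Spec_shlok_lengths shlokasSyllables out) := by unfold Spec_shlok_lengths; infer_instance

-- ===== CLAIM (what is proved, stated in full; the proofs are below) =====
def Claim_equal_shlok_lengths : Prop := ∀ (shlokasSyllables : List (List String)), Dom_shlok_lengths shlokasSyllables → Spec_shlok_lengths shlokasSyllables (shlok_lengths shlokasSyllables)

-- ===== LEMMAS AND PROOFS =====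

-- A's branch is exactly Dict.modify: on an absent key, modify with default [] inserts f []
lemma pv_insert_eq_modify (d : PySem.Dict Int (List Int)) (k i : Int)
    (h : d.contains k = false) :
    d.insert k [i] = d.modify k [] (fun v => v ++ [i]) := by
  have h2 : d.get? k = none := by
    rw [PySem.Dict.contains_eq_isSome_get?] at h
    cases hg : d.get? k <;> simp [hg] at h ⊢
  simp [PySem.Dict.modify, PySem.Dict.insert, PySem.Dict.getD, h, h2]

lemma pv_step_eq_modify (d : PySem.Dict Int (List Int)) (p : Int × List String) :
    (if d.contains ((p.2.length : Int)) = false then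
        d.insert ((p.2.length : Int)) [p.1]
      else
        d.modify ((p.2.length : Int)) [] (fun v => v ++ [p.1]))
      = d.modify ((p.2.length : Int)) [] (fun v => v ++ [p.1]) := by
  by_cases h : d.contains ((p.2.length : Int)) = false
  · simp [h, pv_insert_eq_modify d _ _ h]
  · simp [h]

-- enumerate commutes with map on the elements
lemma pv_enumerate_map {α β : Type} (f : α → β) (xs : List α) (s : Int) :
    PySem.List.enumerate (xs.map f) s
      = (PySem.List.enumerate xs s).map (fun p => (p.1, f p.2)) := by
  induction xs generalizing s with
  | nil => simp [PySem.List.enumerate_nil]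
  | cons x xs ih => simp [PySem.List.enumerate_cons, ih]

-- B's per-key comprehension over (index, length) pairs equals filter-then-map
-- over the swapped (length, index) pairs A's loop feeds the dict
lemma pv_filterMap_eq_filter_swap (l : List (Int × Int)) (L : Int) :
    l.filterMap (fun p => if p.2 = L then some p.1 else none)
      = ((l.map (fun p => (p.2, p.1))).filter (fun p => p.1 == L)).map (fun p => p.2) := by
  induction l with
  | nil => simp
  | cons q l ih =>
    by_cases h : q.2 = L <;> simp [h, ih]

-- ===== VERDICT (by name: the statement is the Claim_ definition above) =====
theorem shlok_lengths_spec : Claim_equal_shlok_lengths := by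
  intro xs _
  unfold Spec_shlok_lengths shlok_lengths shlok_lengths_alt
  -- rewrite A's fold step to a uniform modify
  have hstep : (PySem.List.enumerate xs).foldl
      (fun (d : PySem.Dict Int (List Int)) (p : Int × List String) =>
        let lenSyllables : Int := (p.2.length : Int)
        if d.contains lenSyllables = false then d.insert lenSyllables [p.1]
        else d.modify lenSyllables [] (fun v => v ++ [p.1])) PySem.Dict.empty
      = (PySem.List.enumerate xs).foldl
        (fun d p => d.modify ((p.2.length : Int)) [] (fun v => v ++ [p.1]))
        PySem.Dict.empty := by
    apply PySem.List.foldl_congr_mem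
    intro d p _; exact pv_step_eq_modify d p
  rw [hstep]
  -- view A's loop as a fold over swapped (length, index) pairs
  set es := PySem.List.enumerate xs (0 : Int) with hes
  set ps : List (Int × Int) := es.map (fun p => ((p.2.length : Int), p.1)) with hps
  have hfold : es.foldl
      (fun (d : PySem.Dict Int (List Int)) p => d.modify ((p.2.length : Int)) [] (fun v => v ++ [p.1]))
      PySem.Dict.empty
      = ps.foldl (fun d q => d.modify q.1 [] (fun v => v ++ [q.2])) PySem.Dict.empty := by
    rw [hps, List.foldl_map]
  rw [hfold]
  set d := ps.foldl (fun (d : PySem.Dict Int (List Int)) q => d.modify q.1 [] (fun v => v ++ [q.2])) PySem.Dict.empty with hd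
  have hnd : d.keys.Nodup := by
    rw [hd]
    exact PySem.Dict.nodup_keys_foldl_modify_key ps (fun q => q.1) []
      (fun d q => fun v => v ++ [q.2]) PySem.Dict.empty (by simp)
  have hkeys : d.keys = PySem.Set.ofList (ps.map (fun q => q.1)) := by
    rw [hd, PySem.Dict.keys_foldl_modify_key]
    simp [PySem.Set.update_nil_left]
  have hitems : d.items = d.keys.map (fun k => (k, d.getD k [])) :=
    PySem.Dict.items_eq_map_keys d hnd []
  have hgetD : ∀ k, d.getD k [] = (ps.filter (fun q => q.1 == k)).map (fun q => q.2) := by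
    intro k
    rw [hd, PySem.Dict.getD_foldl_modify_append]
    simp
  -- identify the key lists on both sides
  have hlen : ps.map (fun q => q.1) = xs.map (fun s => (s.length : Int)) := by
    rw [hps]
    simp only [List.map_map]
    have := PySem.List.map_snd_enumerate xs (0 : Int)
    calc es.map ((fun q : Int × Int => q.1) ∘ fun p : Int × List String => ((p.2.length : Int), p.1))
        = (es.map (fun p => p.2)).map (fun s => (s.length : Int)) := by simp [List.map_map, Function.comp]
      _ = xs.map (fun s => (s.length : Int)) := by rw [hes, this]
  have henum : PySem.List.enumerate (xs.map (fun s => (s.length : Int))) (0 : Int)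
      = es.map (fun p => ((p.1 : Int), (p.2.length : Int))) := by
    rw [pv_enumerate_map, hes]
  rw [hitems, hkeys, hlen]
  simp only [PySem.List.dedup_eq_ofList]
  apply List.map_congr_left
  intro L _
  refine Prod.ext rfl ?_
  rw [hgetD L, henum, pv_filterMap_eq_filter_swap]
  simp [hps, List.map_map, Function.comp_def]
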